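-- pv_equiv track=rewrite | github.com/whatevertogo/AstrBot | astrbot_sdk/runtime/peer.py | _select_negotiated_protocol_version
-- ===== SOURCE A (Python) =====
-- from collections.abc import AsyncIterator, Awaitable, Callable, Sequence
-- from typing import Any
--
-- SUPPORTED_PROTOCOL_VERSIONS_METADATA_KEY = "supported_protocol_versions"
--
-- def _parse_protocol_version(version: str) -> tuple[int, int] | None:
--     major, dot, minor = version.partition(".")
--     if not dot or not major.isdigit() or not minor.isdigit():
--         return None
--     return int(major), int(minor)
--
-- def _select_negotiated_protocol_version(
--     requested_version: str,
--     remote_metadata: dict[str, Any],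
--     local_supported_versions: Sequence[str],
-- ) -> str | None:
--     if requested_version in local_supported_versions:
--         return requested_version
--     requested_key = _parse_protocol_version(requested_version)
--     if requested_key is None:
--         return None
--     remote_supported = remote_metadata.get(SUPPORTED_PROTOCOL_VERSIONS_METADATA_KEY)
--     if not isinstance(remote_supported, (list, tuple)):
--         return None
--     local_supported_set = set(local_supported_versions)
--     compatible_versions: list[tuple[tuple[int, int], str]] = []
--     for version in remote_supported:
--         if not isinstance(version, str) or version not in local_supported_set:
--             continue
--         parsed_version = _parse_protocol_version(version)
--         if parsed_version is None:
--             continue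
--         if parsed_version[0] != requested_key[0] or parsed_version > requested_key:
--             continue
--         compatible_versions.append((parsed_version, version))
--     if not compatible_versions:
--         return None
--     compatible_versions.sort(reverse=True)
--     return compatible_versions[0][1]
-- ===== SOURCE B (Python) =====
-- SUPPORTED_PROTOCOL_VERSIONS_METADATA_KEY = "supported_protocol_versions"
--
-- def _parse_protocol_version(version):
--     major, dot, minor = version.partition(".")
--     if not dot or not major.isdigit() or not minor.isdigit():
--         return None
--     return int(major), int(minor)
--
-- def _select_negotiated_protocol_version(requested_version, remote_metadata, local_supported_versions):
--     if requested_version in local_supported_versions: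
--         return requested_version
--     requested_key = _parse_protocol_version(requested_version)
--     if requested_key is None:
--         return None
--     remote_supported = remote_metadata.get(SUPPORTED_PROTOCOL_VERSIONS_METADATA_KEY)
--     if not isinstance(remote_supported, (list, tuple)):
--         return None
--     local_set = set(local_supported_versions)
--
--     def key_of(version):
--         # full sort key ((major, minor), version), or None if the version is filtered out
--         if not isinstance(version, str) or version not in local_set:
--             return None
--         parsed = _parse_protocol_version(version)
--         if parsed is not None and parsed[0] == requested_key[0] and parsed <= requested_key:
--             return (parsed, version)
--         return None
--
--     best = max((k for k in map(key_of, remote_supported) if k is not None), default=None)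
--     return best[1] if best is not None else None
-- ===== Notes on version B (the rewrite author's own statement) =====
-- stated objective: simpler
-- what changed: Replaces the intermediate compatible_versions list plus reverse sort with a key_of filter-map and a single max over the full (parsed, version) keys.
import Mathlib
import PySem

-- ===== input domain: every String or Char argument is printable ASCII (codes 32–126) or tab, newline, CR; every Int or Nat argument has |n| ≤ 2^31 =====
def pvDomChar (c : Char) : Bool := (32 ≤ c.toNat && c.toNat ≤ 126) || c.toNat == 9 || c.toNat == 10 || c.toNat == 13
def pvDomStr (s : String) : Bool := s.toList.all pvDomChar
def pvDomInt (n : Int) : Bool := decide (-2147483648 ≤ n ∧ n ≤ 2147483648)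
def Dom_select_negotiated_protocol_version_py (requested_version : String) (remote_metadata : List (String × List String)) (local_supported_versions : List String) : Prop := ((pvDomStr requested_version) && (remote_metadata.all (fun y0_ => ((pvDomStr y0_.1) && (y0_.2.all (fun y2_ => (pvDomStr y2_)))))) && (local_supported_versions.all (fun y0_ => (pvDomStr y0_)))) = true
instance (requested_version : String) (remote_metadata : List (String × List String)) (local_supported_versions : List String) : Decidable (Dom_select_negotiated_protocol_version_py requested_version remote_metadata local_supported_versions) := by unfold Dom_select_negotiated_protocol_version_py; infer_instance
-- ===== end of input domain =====

-- B replaces A's intermediate compatible_versions list + reverse sort by a key_of filter-map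
-- followed by a single max over the full (parsed, version) keys; same guards, same value.

-- shared helper: _parse_protocol_version.  version.partition(".") is ported by hand for the
-- one-char separator '.': takeWhile/dropWhile on the char list (exact: first '.' splits; no '.'
-- gives an empty remainder = Python's empty `dot`).  int(major)/int(minor) via PySem.Int.ofChars?
-- (cannot be none after the isdigit guard; getD 0 is unreachable).
def parseProtocolVersion (version : String) : Option (Int × Int) :=
  let cs := version.toList
  let major := cs.takeWhile (· ≠ '.')
  let rest := cs.dropWhile (· ≠ '.')
  if rest.isEmpty || !(PySem.Chars.strIsdigit major) || !(PySem.Chars.strIsdigit rest.tail) then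
    none
  else
    some ((PySem.Int.ofChars? major).getD 0, (PySem.Int.ofChars? rest.tail).getD 0)

-- Python 'parsed > requested_key' on int pairs: lexicographic tuple comparison
def pyPairGt (p q : Int × Int) : Bool := decide (toLex q < toLex p)

-- Python's ordering of a ((int, int), str) tuple: lexicographic; encoded as a Lex key
def verKey (x : (Int × Int) × String) : Lex (Int × Lex (Int × String)) :=
  toLex (x.1.1, toLex (x.1.2, x.2))

-- ===== PORT A =====
-- remote_metadata.get(KEY): assoc-list first match; the isinstance checks are vacuous under the
-- typed signature (values are lists of str) and are dropped.
def select_negotiated_protocol_version_py (requested_version : String) (remote_metadata : List (String × List String)) (local_supported_versions : List String) : Option String :=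
  if local_supported_versions.contains requested_version then some requested_version
  else
    match parseProtocolVersion requested_version with
    | none => none
    | some requestedKey =>
      match (remote_metadata.find? (fun kv => kv.1 == "supported_protocol_versions")).map (·.2) with
      | none => none
      | some remoteSupported =>
        let localSet : PySem.Set String := PySem.Set.ofList local_supported_versions
        let compat := remoteSupported.foldl (fun acc version =>
          if PySem.Set.contains localSet version then
            match parseProtocolVersion version with
            | none => acc
            | some p =>
              if p.1 ≠ requestedKey.1 || pyPairGt p requestedKey then acc
              else acc ++ [(p, version)]
          else acc) ([] : List ((Int × Int) × String))
        if compat.isEmpty then none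
        else (PySem.List.sorted compat verKey true).head?.map (·.2)

-- ===== PORT B =====
-- key_of: the full sort key ((major, minor), version), or none if filtered out
def keyOf (localSet : PySem.Set String) (requestedKey : Int × Int) (version : String) : Option ((Int × Int) × String) :=
  if !PySem.Set.contains localSet version then none
  else (parseProtocolVersion version).bind (fun parsed =>
    if parsed.1 == requestedKey.1 && !pyPairGt parsed requestedKey then some (parsed, version)
    else none)

-- Python's max over ((int,int), str) tuples compares them lexicographically = max? by verKey
def select_negotiated_protocol_version_py_alt (requested_version : String) (remote_metadata : List (String × List String)) (local_supported_versions : List String) : Option String :=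
  if local_supported_versions.contains requested_version then some requested_version
  else
    (parseProtocolVersion requested_version).bind (fun requestedKey =>
      ((remote_metadata.find? (fun kv => kv.1 == "supported_protocol_versions")).map (·.2)).bind
        (fun remoteSupported =>
          let localSet : PySem.Set String := PySem.Set.ofList local_supported_versions
          (PySem.List.max? (remoteSupported.filterMap (keyOf localSet requestedKey)) verKey).map (·.2)))

-- ===== PRECONDITION & SPEC =====
def Spec_select_negotiated_protocol_version_py (requested_version : String) (remote_metadata : List (String × List String)) (local_supported_versions : List String) (out : Option String) : Prop := out = select_negotiated_protocol_version_py_alt requested_version remote_metadata local_supported_versions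
instance (requested_version : String) (remote_metadata : List (String × List String)) (local_supported_versions : List String) (out : Option String) : Decidable (Spec_select_negotiated_protocol_version_py requested_version remote_metadata local_supported_versions out) := by unfold Spec_select_negotiated_protocol_version_py; infer_instance

-- ===== CLAIM (what is proved, stated in full; the proofs are below) =====
def Claim_equal_select_negotiated_protocol_version_py : Prop := ∀ (requested_version : String) (remote_metadata : List (String × List String)) (local_supported_versions : List String), Dom_select_negotiated_protocol_version_py requested_version remote_metadata local_supported_versions → Spec_select_negotiated_protocol_version_py requested_version remote_metadata local_supported_versions (select_negotiated_protocol_version_py requested_version remote_metadata local_supported_versions)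

-- ===== LEMMAS AND PROOFS =====

lemma verKey_inj {a b : (Int × Int) × String} (h : verKey a = verKey b) : a = b := by
  simp only [verKey, toLex_inj, Prod.mk.injEq] at h
  obtain ⟨h1, h2, h3⟩ := h
  exact Prod.ext (Prod.ext h1 h2) h3

-- A's accumulated list is the filter-map of B's key_of
lemma compatA (localSet : PySem.Set String) (rk : Int × Int) (rs : List String) :
    rs.foldl (fun acc version =>
      if PySem.Set.contains localSet version then
        match parseProtocolVersion version with
        | none => acc
        | some p =>
          if p.1 ≠ rk.1 || pyPairGt p rk then acc
          else acc ++ [(p, version)]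
      else acc) ([] : List ((Int × Int) × String)) = rs.filterMap (keyOf localSet rk) := by
  have h : ∀ (acc : List ((Int × Int) × String)) (v : String),
      (if PySem.Set.contains localSet v then
        match parseProtocolVersion v with
        | none => acc
        | some p => if p.1 ≠ rk.1 || pyPairGt p rk then acc else acc ++ [(p, v)]
      else acc) = acc ++ (keyOf localSet rk v).toList := by
    intro acc v
    unfold keyOf
    cases hpv : parseProtocolVersion v <;> split_ifs <;> (try simp only [Option.bind]) <;>
      (try split_ifs) <;> simp_all
  have hfun : (fun (acc : List ((Int × Int) × String)) version =>
      if PySem.Set.contains localSet version then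
        match parseProtocolVersion version with
        | none => acc
        | some p => if p.1 ≠ rk.1 || pyPairGt p rk then acc else acc ++ [(p, version)]
      else acc) = fun acc v => acc ++ (keyOf localSet rk v).toList :=
    funext fun acc => funext fun v => h acc v
  rw [hfun, PySem.List.foldl_append_eq_flatMap]
  simp only [List.nil_append]
  induction rs with
  | nil => rfl
  | cons a t ih => cases hk : keyOf localSet rk a <;> simp [hk, ih]

-- head of the reverse-sorted list = the (unique, by injectivity of verKey) maximum
lemma main_max (l : List ((Int × Int) × String)) :
    (if l.isEmpty then none else (PySem.List.sorted l verKey true).head?.map (·.2))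
      = (PySem.List.max? l verKey).map (·.2) := by
  cases hl : l with
  | nil => simp [PySem.List.max?_eq_none_iff]
  | cons x xs =>
    rw [if_neg (by simp)]
    cases hm : PySem.List.max? (x :: xs) verKey with
    | none => exact absurd ((PySem.List.max?_eq_none_iff _ _).mp hm) (by simp)
    | some c =>
      have hcmem : c ∈ (x :: xs) := PySem.List.max?_mem hm
      have hcge : ∀ y ∈ (x :: xs), verKey y ≤ verKey c := PySem.List.max?_isMax hm
      have hne : PySem.List.sorted (x :: xs) verKey true ≠ [] := by
        intro h
        exact (List.cons_ne_nil x xs) ((PySem.List.sorted_eq_nil_iff (x :: xs) verKey true).mp h)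
      obtain ⟨m, t, hmt⟩ := List.exists_cons_of_ne_nil hne
      rw [hmt]
      have hmmem : m ∈ (x :: xs) := by
        refine (PySem.List.sorted_perm (x :: xs) verKey true).mem_iff.mp ?_
        rw [hmt]
        exact List.mem_cons_self
      have hmge : ∀ y ∈ (x :: xs), verKey y ≤ verKey m :=
        PySem.List.key_head_sorted_rev_ge (x :: xs) verKey hmt
      have : m = c := verKey_inj (le_antisymm (hcge m hmmem) (hmge c hcmem))
      simp [this]

-- ===== VERDICT (by name: the statement is the Claim_ definition above) =====
theorem select_negotiated_protocol_version_py_spec : Claim_equal_select_negotiated_protocol_version_py := by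
  intro rv rm ls _
  unfold Spec_select_negotiated_protocol_version_py
  unfold select_negotiated_protocol_version_py select_negotiated_protocol_version_py_alt
  split
  · rfl
  · cases hp : parseProtocolVersion rv with
    | none => rfl
    | some rk =>
      cases hr : (rm.find? (fun kv => kv.1 == "supported_protocol_versions")).map (·.2) with
      | none => rfl
      | some rs =>
        simp only [Option.bind_some]
        rw [compatA, main_max]
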